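-- pv_equiv track=rewrite | github.com/nkuzmenkoV/pokerhelper | backend/app/db/charts.py | _get_stack_key
-- ===== SOURCE A (Python) =====
-- from typing import Optional
--
-- def _get_stack_key(stack_bb: int, ranges: dict) -> Optional[str]:
--     """Find the nearest stack bucket key."""
--     # Standard buckets
--     buckets = [3, 4, 5, 6, 7, 8, 10, 12, 15]
--
--     # Find nearest bucket that exists in ranges
--     available_keys = [k for k in ranges.keys() if k.endswith("bb")]
--
--     if not available_keys:
--         # Try without 'bb' suffix
--         available_keys = list(ranges.keys())
--
--     # Parse available stack sizes
--     available_stacks = []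
--     for key in available_keys:
--         try:
--             stack = int(key.replace("bb", ""))
--             available_stacks.append((stack, key))
--         except ValueError:
--             continue
--
--     if not available_stacks:
--         return None
--
--     # Find nearest bucket
--     available_stacks.sort(key=lambda x: x[0])
--
--     for stack, key in available_stacks:
--         if stack_bb <= stack:
--             return key
--
--     # Return largest if stack exceeds all buckets
--     return available_stacks[-1][1]
-- ===== SOURCE B (Python) =====
-- from typing import Optional
--
-- def _get_stack_key(stack_bb: int, ranges: dict) -> Optional[str]:
--     """Find the nearest stack bucket key: one linear pass, no sorting."""
--     keys = [k for k in ranges.keys() if k.endswith("bb")] or list(ranges.keys())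
--     best_ge = None   # smallest stack >= stack_bb, earliest on ties
--     best_max = None  # largest stack overall, latest on ties
--     for key in keys:
--         try:
--             s = int(key.replace("bb", ""))
--         except ValueError:
--             continue
--         if stack_bb <= s and (best_ge is None or s < best_ge[0]):
--             best_ge = (s, key)
--         if best_max is None or s >= best_max[0]:
--             best_max = (s, key)
--     if best_ge is not None:
--         return best_ge[1]
--     if best_max is not None:
--         return best_max[1]
--     return None
-- ===== Notes on version B (the rewrite author's own statement) =====
-- stated objective: alternative
-- what changed: Replaces A's build-list/stable-sort/scan-plus-last-element with a single linear pass over the parsed keys that maintains two running candidates (smallest stack >= stack_bb, earliest on ties; largest stack, latest on ties), eliminating the sort entirely.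
import Mathlib
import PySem

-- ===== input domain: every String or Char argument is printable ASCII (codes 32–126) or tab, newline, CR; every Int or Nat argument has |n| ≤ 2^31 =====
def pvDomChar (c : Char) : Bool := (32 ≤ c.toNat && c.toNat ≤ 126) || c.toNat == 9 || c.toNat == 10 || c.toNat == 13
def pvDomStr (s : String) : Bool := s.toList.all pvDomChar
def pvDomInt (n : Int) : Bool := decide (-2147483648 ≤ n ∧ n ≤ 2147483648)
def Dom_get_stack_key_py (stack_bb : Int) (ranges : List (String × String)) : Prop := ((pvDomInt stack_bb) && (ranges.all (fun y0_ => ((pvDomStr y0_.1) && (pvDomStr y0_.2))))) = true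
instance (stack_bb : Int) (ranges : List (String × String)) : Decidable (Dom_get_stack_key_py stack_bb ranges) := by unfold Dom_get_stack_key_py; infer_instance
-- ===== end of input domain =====

-- B replaces A's sort-then-scan by a single linear pass keeping two running candidates; return value proved equal on all inputs (A is total).

-- ===== PORT A =====
-- A's final for-loop: return the key of the first (stack, key) with stack_bb <= stack
def pvAFind (stack_bb : Int) : List (Int × String) → Option String
  | [] => none
  | (s, k) :: rest => if stack_bb ≤ s then some k else pvAFind stack_bb rest

def get_stack_key_py (stack_bb : Int) (ranges : List (String × String)) : Option String :=
  let allKeys := (PySem.Dict.ofList ranges).keys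
  let available_keys0 := allKeys.filter (fun k => PySem.Str.endswith k "bb")
  let available_keys := if available_keys0 = [] then allKeys else available_keys0
  let available_stacks := available_keys.foldl (fun acc key =>
      match PySem.Int.ofStr? (PySem.Str.replace key "bb" "") with
      | some stack => acc ++ [(stack, key)]
      | none => acc) ([] : List (Int × String))
  if available_stacks = [] then none
  else
    let srt := PySem.List.sorted available_stacks (fun x => x.1)
    match pvAFind stack_bb srt with
    | some k => some k
    | none => (PySem.List.pyGet? srt (-1)).map Prod.snd

-- ===== PORT B =====
-- B's best_ge update: smallest stack ≥ stack_bb, earliest on ties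
def pvStepGe (stack_bb : Int) (g : Option (Int × String)) (p : Int × String) : Option (Int × String) :=
  match g with
  | none => if stack_bb ≤ p.1 then some p else none
  | some g => if stack_bb ≤ p.1 ∧ p.1 < g.1 then some p else some g

-- B's best_max update: largest stack, latest on ties
def pvStepMax (m : Option (Int × String)) (p : Int × String) : Option (Int × String) :=
  match m with
  | none => some p
  | some m => if m.1 ≤ p.1 then some p else some m

def get_stack_key_py_alt (stack_bb : Int) (ranges : List (String × String)) : Option String :=
  let allKeys := (PySem.Dict.ofList ranges).keys
  let keys0 := allKeys.filter (fun k => PySem.Str.endswith k "bb")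
  let keys := if keys0 = [] then allKeys else keys0
  let st := keys.foldl (fun st key =>
      match PySem.Int.ofStr? (PySem.Str.replace key "bb" "") with
      | some s => (pvStepGe stack_bb st.1 (s, key), pvStepMax st.2 (s, key))
      | none => st) ((none, none) : Option (Int × String) × Option (Int × String))
  match st.1 with
  | some g => some g.2
  | none => st.2.map Prod.snd

-- ===== PRECONDITION & SPEC =====
def Spec_get_stack_key_py (stack_bb : Int) (ranges : List (String × String)) (out : Option String) : Prop := out = get_stack_key_py_alt stack_bb ranges
instance (stack_bb : Int) (ranges : List (String × String)) (out : Option String) : Decidable (Spec_get_stack_key_py stack_bb ranges out) := by unfold Spec_get_stack_key_py; infer_instance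

-- ===== CLAIM (what is proved, stated in full; the proofs are below) =====
def Claim_equal_get_stack_key_py : Prop := ∀ (stack_bb : Int) (ranges : List (String × String)), Dom_get_stack_key_py stack_bb ranges → Spec_get_stack_key_py stack_bb ranges (get_stack_key_py stack_bb ranges)

-- ===== LEMMAS AND PROOFS =====

-- the parsed (stack, key) pairs of a key list, in order
def pvParsed : List String → List (Int × String)
  | [] => []
  | key :: rest =>
    match PySem.Int.ofStr? (PySem.Str.replace key "bb" "") with
    | some s => (s, key) :: pvParsed rest
    | none => pvParsed rest

-- first pair meeting the threshold
def pvFirstGe (stack_bb : Int) : List (Int × String) → Option (Int × String)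
  | [] => none
  | p :: rest => if stack_bb ≤ p.1 then some p else pvFirstGe stack_bb rest

theorem pvFirstGe_cons (t : Int) (p : Int × String) (l : List (Int × String)) :
    pvFirstGe t (p :: l) = if t ≤ p.1 then some p else pvFirstGe t l := rfl

theorem pvStepGe_none (t : Int) (p : Int × String) :
    pvStepGe t none p = if t ≤ p.1 then some p else none := rfl

theorem pvStepGe_some (t : Int) (g p : Int × String) :
    pvStepGe t (some g) p = if t ≤ p.1 ∧ p.1 < g.1 then some p else some g := rfl

theorem pvInsertBy_nil (bf : Int × String → Int × String → Bool) (x : Int × String) :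
    PySem.List.insertBy bf x [] = [x] := rfl

theorem pvInsertBy_cons (bf : Int × String → Int × String → Bool) (x y : Int × String)
    (ys : List (Int × String)) :
    PySem.List.insertBy bf x (y :: ys) =
      if bf x y then x :: y :: ys else y :: PySem.List.insertBy bf x ys := rfl

theorem pvAFind_eq (t : Int) (l : List (Int × String)) :
    pvAFind t l = (pvFirstGe t l).map Prod.snd := by
  induction l with
  | nil => rfl
  | cons p rest ih =>
    cases p with
    | mk s k => simp only [pvAFind, pvFirstGe]; split_ifs <;> simp [ih]

theorem pvFirstGe_mem {t : Int} {l : List (Int × String)} {m : Int × String}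
    (h : pvFirstGe t l = some m) : m ∈ l := by
  induction l with
  | nil => simp [pvFirstGe] at h
  | cons p rest ih =>
    simp only [pvFirstGe] at h
    split_ifs at h with hp
    · exact List.mem_cons.mpr (Or.inl (Option.some.inj h).symm)
    · exact List.mem_cons.mpr (Or.inr (ih h))

theorem pvAFold_eq (keys : List String) (acc : List (Int × String)) :
    keys.foldl (fun acc key =>
      match PySem.Int.ofStr? (PySem.Str.replace key "bb" "") with
      | some stack => acc ++ [(stack, key)]
      | none => acc) acc = acc ++ pvParsed keys := by
  induction keys generalizing acc with
  | nil => simp [pvParsed]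
  | cons key rest ih =>
    simp only [List.foldl_cons, pvParsed]
    cases PySem.Int.ofStr? (PySem.Str.replace key "bb" "") <;> simp [ih]

theorem pvBFold_eq (t : Int) (keys : List String)
    (init : Option (Int × String) × Option (Int × String)) :
    keys.foldl (fun st key =>
      match PySem.Int.ofStr? (PySem.Str.replace key "bb" "") with
      | some s => (pvStepGe t st.1 (s, key), pvStepMax st.2 (s, key))
      | none => st) init
      = (pvParsed keys).foldl (fun st p => (pvStepGe t st.1 p, pvStepMax st.2 p)) init := by
  induction keys generalizing init with
  | nil => rfl
  | cons key rest ih =>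
    simp only [List.foldl_cons, pvParsed]
    cases PySem.Int.ofStr? (PySem.Str.replace key "bb" "") <;> simp [ih]

-- one insertion step of A's stable sort preserves sortedness
theorem pvInsert_pairwise (x : Int × String) (acc : List (Int × String))
    (hs : acc.Pairwise (fun a b => a.1 ≤ b.1)) :
    (PySem.List.insertBy (fun a b => decide (a.1 < b.1)) x acc).Pairwise
      (fun a b => a.1 ≤ b.1) := by
  induction acc with
  | nil => simp [pvInsertBy_nil]
  | cons y ys ih =>
    have hy : ∀ z ∈ ys, y.1 ≤ z.1 := (List.pairwise_cons.mp hs).1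
    have hys : ys.Pairwise (fun a b => a.1 ≤ b.1) := (List.pairwise_cons.mp hs).2
    rw [pvInsertBy_cons]
    by_cases hxy : x.1 < y.1
    · simp only [hxy, decide_true, if_true]
      refine List.pairwise_cons.mpr ⟨?_, hs⟩
      intro z hz
      rcases List.mem_cons.mp hz with h | h
      · exact le_of_lt (h ▸ hxy)
      · exact le_of_lt (lt_of_lt_of_le hxy (hy z h))
    · simp only [hxy, decide_false]
      rw [if_neg (by simp)]
      refine List.pairwise_cons.mpr ⟨?_, ih hys⟩
      intro z hz
      rcases (PySem.List.mem_insertBy _ _ _ _).mp hz with h | h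
      · exact h ▸ le_of_not_gt hxy
      · exact hy z h

-- one insertion step, seen through the best_ge candidate
theorem pvInsert_firstGe (t : Int) (x : Int × String) (acc : List (Int × String))
    (hs : acc.Pairwise (fun a b => a.1 ≤ b.1)) :
    pvFirstGe t (PySem.List.insertBy (fun a b => decide (a.1 < b.1)) x acc) =
      pvStepGe t (pvFirstGe t acc) x := by
  induction acc with
  | nil =>
    rw [pvInsertBy_nil]
    rfl
  | cons y ys ih =>
    have hy : ∀ z ∈ ys, y.1 ≤ z.1 := (List.pairwise_cons.mp hs).1
    have hys : ys.Pairwise (fun a b => a.1 ≤ b.1) := (List.pairwise_cons.mp hs).2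
    rw [pvInsertBy_cons]
    by_cases hxy : x.1 < y.1
    · simp only [hxy, decide_true, if_true]
      rw [pvFirstGe_cons t x (y :: ys)]
      by_cases htx : t ≤ x.1
      · rw [if_pos htx]
        rcases hg : pvFirstGe t (y :: ys) with _ | m
        · rw [pvStepGe_none, if_pos htx]
        · have hm : y.1 ≤ m.1 := by
            rcases List.mem_cons.mp (pvFirstGe_mem hg) with h | h
            · exact le_of_eq (by rw [h])
            · exact hy m h
          rw [pvStepGe_some, if_pos ⟨htx, lt_of_lt_of_le hxy hm⟩]
      · rw [if_neg htx]
        rcases hg : pvFirstGe t (y :: ys) with _ | m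
        · rw [pvStepGe_none, if_neg htx]
        · rw [pvStepGe_some, if_neg (by rintro ⟨h, -⟩; exact htx h)]
    · simp only [hxy, decide_false]
      rw [if_neg (by simp)]
      have hyx : y.1 ≤ x.1 := le_of_not_gt hxy
      rw [pvFirstGe_cons, pvFirstGe_cons]
      by_cases hty : t ≤ y.1
      · rw [if_pos hty, if_pos hty, pvStepGe_some,
          if_neg (by rintro ⟨-, hlt⟩; exact absurd hlt (not_lt_of_ge hyx))]
      · rw [if_neg hty, if_neg hty]
        exact ih hys

-- one insertion step, seen through the best_max candidate
theorem pvInsert_getLast (x : Int × String) (acc : List (Int × String))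
    (hs : acc.Pairwise (fun a b => a.1 ≤ b.1)) :
    (PySem.List.insertBy (fun a b => decide (a.1 < b.1)) x acc).getLast? =
      pvStepMax acc.getLast? x := by
  induction acc with
  | nil => rfl
  | cons y ys ih =>
    have hy : ∀ z ∈ ys, y.1 ≤ z.1 := (List.pairwise_cons.mp hs).1
    have hys : ys.Pairwise (fun a b => a.1 ≤ b.1) := (List.pairwise_cons.mp hs).2
    rw [pvInsertBy_cons]
    by_cases hxy : x.1 < y.1
    · simp only [hxy, decide_true, if_true, List.getLast?_cons_cons]
      rcases hl : (y :: ys).getLast? with _ | m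
      · simp at hl
      · have hm : y.1 ≤ m.1 := by
          rcases List.mem_cons.mp (List.mem_of_getLast? hl) with h | h
          · exact le_of_eq (by rw [h])
          · exact hy m h
        simp only [pvStepMax]
        rw [if_neg (not_le_of_gt (lt_of_lt_of_le hxy hm))]
    · simp only [hxy, decide_false]
      rw [if_neg (by simp)]
      have hne : PySem.List.insertBy (fun a b => decide (a.1 < b.1)) x ys ≠ [] :=
        List.ne_nil_of_mem ((PySem.List.mem_insertBy _ _ _ _).mpr (Or.inl rfl))
      rcases he : PySem.List.insertBy (fun a b => decide (a.1 < b.1)) x ys with _ | ⟨z, zs⟩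
      · exact absurd he hne
      · rw [he, List.getLast?_cons_cons, ← he, ih hys]
        cases ys with
        | nil => simp [pvStepMax, le_of_not_gt hxy]
        | cons w ws =>
          rcases hl : (w :: ws).getLast? with _ | m
          · simp at hl
          · rw [List.getLast?_cons_cons, hl]

-- the whole stable insertion sort, seen through B's two candidates
theorem pvSortInv (t : Int) (L : List (Int × String)) (acc : List (Int × String))
    (hs : acc.Pairwise (fun a b => a.1 ≤ b.1)) :
    (L.foldl (fun acc x => PySem.List.insertBy (fun a b => decide (a.1 < b.1)) x acc) acc).Pairwise
        (fun a b => a.1 ≤ b.1) ∧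
    pvFirstGe t (L.foldl (fun acc x => PySem.List.insertBy (fun a b => decide (a.1 < b.1)) x acc) acc)
        = L.foldl (pvStepGe t) (pvFirstGe t acc) ∧
    (L.foldl (fun acc x => PySem.List.insertBy (fun a b => decide (a.1 < b.1)) x acc) acc).getLast?
        = L.foldl pvStepMax acc.getLast? := by
  induction L generalizing acc with
  | nil => exact ⟨hs, rfl, rfl⟩
  | cons x rest ih =>
    simp only [List.foldl_cons]
    obtain ⟨h1, h2, h3⟩ := ih _ (pvInsert_pairwise x acc hs)
    exact ⟨h1, by rw [h2, pvInsert_firstGe t x acc hs], by rw [h3, pvInsert_getLast x acc hs]⟩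

theorem pvPyGetNegOne {l : List (Int × String)} (h : l ≠ []) :
    PySem.List.pyGet? l (-1) = l.getLast? := by
  rw [List.getLast?_eq_getElem?]
  have hl : 1 ≤ l.length := by
    cases l with
    | nil => exact absurd rfl h
    | cons a l => exact Nat.succ_le_succ (Nat.zero_le _)
  simp [PySem.List.pyGet?, PySem.List.pyIdx?, hl]

-- ===== VERDICT (by name: the statement is the Claim_ definition above) =====
theorem get_stack_key_py_spec : Claim_equal_get_stack_key_py := by
  intro t ranges _
  unfold Spec_get_stack_key_py get_stack_key_py get_stack_key_py_alt
  simp only [pvAFold_eq, pvBFold_eq]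
  set keys := (if ((PySem.Dict.ofList ranges).keys.filter (fun k => PySem.Str.endswith k "bb")) = []
      then (PySem.Dict.ofList ranges).keys
      else (PySem.Dict.ofList ranges).keys.filter (fun k => PySem.Str.endswith k "bb")) with hkeys
  set L := pvParsed keys with hL
  rw [PySem.List.foldl_prod_mk (f := pvStepGe t) (g := pvStepMax)]
  simp only [List.nil_append]
  obtain ⟨-, h2, h3⟩ := pvSortInv t L [] (by simp)
  simp only [pvFirstGe, List.getLast?_nil] at h2 h3
  by_cases hnil : L = []
  · rw [hnil]
    simp
  · rw [if_neg hnil]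
    simp only [PySem.List.sorted_eq_foldl_insertBy]
    rw [pvAFind_eq]
    rw [h2]
    rcases L.foldl (pvStepGe t) none with _ | g
    · simp only [Option.map_none]
      have hsne : L.foldl (fun acc x => PySem.List.insertBy (fun a b => decide (a.1 < b.1)) x acc) [] ≠ [] := by
        intro hc
        have := (PySem.List.sorted_eq_nil_iff L (fun x => x.1) false).mp
          (by simp only [PySem.List.sorted_eq_foldl_insertBy]; exact hc)
        exact hnil this
      rw [pvPyGetNegOne hsne, h3]
    · simp
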